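-- pv_equiv track=rewrite | github.com/mpaolodr/p_problems | nc/hw3.py | goodSubstrings
-- ===== SOURCE A (Python) =====
-- def goodSubstrings(strToSplit, k):
--
--     if len(strToSplit) == 1 or len(set(strToSplit)) == 1:
--
--         return 1
--
--     results = list()
--
--     sub_s = strToSplit[0]
--
--     max_code_in_sub_s = ord(strToSplit[0])
--     min_code_in_sub_s = ord(strToSplit[0])
--
--     for i in range(1, len(strToSplit)):
--
--         for char in sub_s:
--
--             if ord(char) > max_code_in_sub_s:
--
--                 max_code_in_sub_s = ord(char)
--
--             if ord(char) < min_code_in_sub_s: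
--
--                 min_code_in_sub_s = ord(char)
--
--         if abs(max_code_in_sub_s - ord(strToSplit[i])) <= k and abs(min_code_in_sub_s - ord(strToSplit[i])) <= k:
--
--             sub_s += strToSplit[i]
--
--         else:
--
--             results.append(sub_s)
--             sub_s = strToSplit[i]
--             max_code_in_sub_s = ord(strToSplit[i])
--             min_code_in_sub_s = ord(strToSplit[i])
--
--     results.append(sub_s)
--
--     return len(results)
-- ===== SOURCE B (Python) =====
-- def goodSubstrings(strToSplit, k):
--     if len(strToSplit) == 1 or len(set(strToSplit)) == 1:
--         return 1
--     count = 1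
--     lo = hi = ord(strToSplit[0])
--     for c in map(ord, strToSplit[1:]):
--         if abs(hi - c) <= k and abs(lo - c) <= k:
--             if c < lo:
--                 lo = c
--             if c > hi:
--                 hi = c
--         else:
--             count += 1
--             lo = hi = c
--     return count
-- ===== Notes on version B (the rewrite author's own statement) =====
-- stated objective: faster
-- what changed: B keeps the running max/min character codes of the current segment updated incrementally in one pass and counts segments with an integer counter, instead of A's rescanning the whole accumulated substring at every step and materialising the segment list.
import Mathlib
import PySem

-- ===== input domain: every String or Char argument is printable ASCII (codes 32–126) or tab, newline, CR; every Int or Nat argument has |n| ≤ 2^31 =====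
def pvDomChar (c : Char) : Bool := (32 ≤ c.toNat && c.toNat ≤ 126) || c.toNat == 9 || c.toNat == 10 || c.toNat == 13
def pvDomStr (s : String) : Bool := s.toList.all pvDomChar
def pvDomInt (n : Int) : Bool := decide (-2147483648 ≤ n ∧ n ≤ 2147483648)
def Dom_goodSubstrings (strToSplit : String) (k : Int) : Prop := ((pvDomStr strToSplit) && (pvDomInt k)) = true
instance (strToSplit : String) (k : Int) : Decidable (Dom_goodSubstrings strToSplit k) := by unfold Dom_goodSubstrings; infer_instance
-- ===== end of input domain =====

-- B replaces A's O(n^2) rescan of the accumulated substring by an incrementally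
-- maintained running max/min and a plain segment counter (faster, asymptotic).

-- ===== PORT A =====
-- ord(c) for the ASCII domain
def pvOrd (c : Char) : Int := (c.toNat : Int)

-- Python's inner 'for char in sub_s' loop body: update both max and min codes
def stepScan (p : Int × Int) (ch : Char) : Int × Int :=
  ((if pvOrd ch > p.1 then pvOrd ch else p.1),
   (if pvOrd ch < p.2 then pvOrd ch else p.2))

-- one iteration of A's outer loop: state = (results, sub_s, max_code, min_code)
def stepA (k : Int) (st : List (List Char) × List Char × Int × Int) (c : Char) :
    List (List Char) × List Char × Int × Int :=
  match st with
  | (results, subs, mx, mn) =>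
    let p := subs.foldl stepScan (mx, mn)
    if |p.1 - pvOrd c| ≤ k ∧ |p.2 - pvOrd c| ≤ k then
      (results, subs ++ [c], p.1, p.2)
    else
      (results ++ [subs], [c], pvOrd c, pvOrd c)

def goodSubstrings (strToSplit : String) (k : Int) : Int :=
  let cs := strToSplit.toList
  if cs.length == 1 || (PySem.Set.ofList cs).length == 1 then 1
  else
    match cs with
    | [] => 0   -- unreachable under Pre_: Python A raises IndexError on the empty string
    | c0 :: rest =>
      let fin := rest.foldl (stepA k) ([], [c0], pvOrd c0, pvOrd c0)
      ((fin.1 ++ [fin.2.1]).length : Int)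

-- ===== PORT B =====
-- one iteration of B's single loop: state = (count, lo, hi)
def stepB (k : Int) (st : Int × Int × Int) (ch : Char) : Int × Int × Int :=
  match st with
  | (count, lo, hi) =>
    let c := pvOrd ch
    if |hi - c| ≤ k ∧ |lo - c| ≤ k then
      (count, (if c < lo then c else lo), (if c > hi then c else hi))
    else
      (count + 1, c, c)

def goodSubstrings_alt (strToSplit : String) (k : Int) : Int :=
  let cs := strToSplit.toList
  if cs.length == 1 || (PySem.Set.ofList cs).length == 1 then 1
  else
    match cs with
    | [] => 0   -- unreachable under Pre_: Python B raises IndexError on the empty string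
    | c0 :: rest =>
      (rest.foldl (stepB k) (1, pvOrd c0, pvOrd c0)).1

-- ===== PRECONDITION & SPEC =====
-- Pre_ excludes only the empty string, on which both Pythons raise IndexError.
def Pre_goodSubstrings (strToSplit : String) (k : Int) : Prop := strToSplit ≠ ""
instance (strToSplit : String) (k : Int) : Decidable (Pre_goodSubstrings strToSplit k) := by
  unfold Pre_goodSubstrings; infer_instance
def pvWitness_goodSubstrings : String × Int := ("abzc", 3)

def Spec_goodSubstrings (strToSplit : String) (k : Int) (out : Int) : Prop := out = goodSubstrings_alt strToSplit k
instance (strToSplit : String) (k : Int) (out : Int) : Decidable (Spec_goodSubstrings strToSplit k out) := by unfold Spec_goodSubstrings; infer_instance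

-- ===== CLAIM (what is proved, stated in full; the proofs are below) =====
def Claim_equal_goodSubstrings : Prop := ∀ (strToSplit : String) (k : Int), Dom_goodSubstrings strToSplit k → Pre_goodSubstrings strToSplit k → Spec_goodSubstrings strToSplit k (goodSubstrings strToSplit k)

-- ===== LEMMAS AND PROOFS =====

-- the scan over the pair is the product of a max-fold and a min-fold
def foldMax (l : List Char) (a : Int) : Int := l.foldl (fun m ch => max m (pvOrd ch)) a
def foldMin (l : List Char) (a : Int) : Int := l.foldl (fun m ch => min m (pvOrd ch)) a

lemma scan_eq (l : List Char) (a b : Int) :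
    l.foldl stepScan (a, b) = (foldMax l a, foldMin l b) := by
  induction l generalizing a b with
  | nil => simp [foldMax, foldMin]
  | cons c l ih =>
    simp only [List.foldl_cons, stepScan, foldMax, foldMin]
    rw [ih]
    congr 1 <;> simp [foldMax, foldMin] <;> congr 1 <;> omega

lemma foldMax_cons (c : Char) (l : List Char) (a : Int) :
    foldMax (c :: l) a = foldMax l (max a (pvOrd c)) := rfl

lemma foldMin_cons (c : Char) (l : List Char) (a : Int) :
    foldMin (c :: l) a = foldMin l (min a (pvOrd c)) := rfl

lemma le_foldMax (l : List Char) (a : Int) : a ≤ foldMax l a := by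
  induction l generalizing a with
  | nil => simp [foldMax]
  | cons c l ih => rw [foldMax_cons]; exact le_trans (le_max_left _ _) (ih _)

lemma foldMin_le (l : List Char) (a : Int) : foldMin l a ≤ a := by
  induction l generalizing a with
  | nil => simp [foldMin]
  | cons c l ih => rw [foldMin_cons]; exact le_trans (ih _) (min_le_left _ _)

lemma mem_le_foldMax (l : List Char) (a : Int) {x : Char} (hx : x ∈ l) :
    pvOrd x ≤ foldMax l a := by
  induction l generalizing a with
  | nil => cases hx
  | cons c l ih =>
    rw [foldMax_cons]
    rcases List.mem_cons.mp hx with h | h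
    · subst h; exact le_trans (le_max_right a (pvOrd x)) (le_foldMax l _)
    · exact ih _ h

lemma foldMin_le_mem (l : List Char) (a : Int) {x : Char} (hx : x ∈ l) :
    foldMin l a ≤ pvOrd x := by
  induction l generalizing a with
  | nil => cases hx
  | cons c l ih =>
    rw [foldMin_cons]
    rcases List.mem_cons.mp hx with h | h
    · subst h; exact le_trans (foldMin_le l _) (min_le_right a (pvOrd x))
    · exact ih _ h

lemma foldMax_fixed (l : List Char) (a : Int) (h : ∀ x ∈ l, pvOrd x ≤ a) :
    foldMax l a = a := by
  induction l generalizing a with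
  | nil => simp [foldMax]
  | cons c l ih =>
    rw [foldMax_cons, max_eq_left (h c (by simp))]
    exact ih a (fun x hx => h x (by simp [hx]))

lemma foldMin_fixed (l : List Char) (a : Int) (h : ∀ x ∈ l, a ≤ pvOrd x) :
    foldMin l a = a := by
  induction l generalizing a with
  | nil => simp [foldMin]
  | cons c l ih =>
    rw [foldMin_cons, min_eq_left (h c (by simp))]
    exact ih a (fun x hx => h x (by simp [hx]))

lemma foldMax_idem (l : List Char) (a : Int) : foldMax l (foldMax l a) = foldMax l a :=
  foldMax_fixed l _ (fun _ hx => mem_le_foldMax l a hx)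

lemma foldMin_idem (l : List Char) (a : Int) : foldMin l (foldMin l a) = foldMin l a :=
  foldMin_fixed l _ (fun _ hx => foldMin_le_mem l a hx)

-- main loop invariant: B's counter is one more than A's results length, and
-- B's (hi, lo) is exactly what A's rescan of sub_s will produce
lemma loop_inv (k : Int) (rest : List Char) :
    ∀ (results : List (List Char)) (subs : List Char) (mx mn count lo hi : Int),
    count = (results.length : Int) + 1 →
    subs.foldl stepScan (mx, mn) = (hi, lo) →
    (rest.foldl (stepB k) (count, lo, hi)).1
      = (((rest.foldl (stepA k) (results, subs, mx, mn)).1.length : Int)) + 1 := by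
  induction rest with
  | nil =>
    intro results subs mx mn count lo hi hc _hs
    simpa using hc
  | cons c rest ih =>
    intro results subs mx mn count lo hi hc hs
    simp only [List.foldl_cons]
    rw [scan_eq] at hs
    injection hs with hmax hmin
    have hstepA : stepA k (results, subs, mx, mn) c =
        (if |hi - pvOrd c| ≤ k ∧ |lo - pvOrd c| ≤ k then
          (results, subs ++ [c], hi, lo)
        else
          (results ++ [subs], [c], pvOrd c, pvOrd c)) := by
      simp only [stepA, scan_eq, hmax, hmin]
    by_cases hcond : |hi - pvOrd c| ≤ k ∧ |lo - pvOrd c| ≤ k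
    · rw [hstepA, if_pos hcond]
      have hstepB : stepB k (count, lo, hi) c =
          (count, (if pvOrd c < lo then pvOrd c else lo),
                  (if pvOrd c > hi then pvOrd c else hi)) := by
        simp only [stepB, if_pos hcond]
      rw [hstepB]
      apply ih results (subs ++ [c]) hi lo count _ _ hc
      rw [scan_eq]
      have hfixmax : foldMax subs hi = hi := by
        have h := foldMax_idem subs mx; rw [hmax] at h; exact h
      have hfixmin : foldMin subs lo = lo := by
        have h := foldMin_idem subs mn; rw [hmin] at h; exact h
      have h1 : foldMax (subs ++ [c]) hi = max hi (pvOrd c) := by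
        unfold foldMax at hfixmax ⊢
        rw [List.foldl_append, List.foldl_cons, List.foldl_nil, hfixmax]
      have h2 : foldMin (subs ++ [c]) lo = min lo (pvOrd c) := by
        unfold foldMin at hfixmin ⊢
        rw [List.foldl_append, List.foldl_cons, List.foldl_nil, hfixmin]
      rw [h1, h2]
      simp only [Prod.mk.injEq]
      constructor <;> (split_ifs <;> omega)
    · rw [hstepA, if_neg hcond]
      have hstepB : stepB k (count, lo, hi) c = (count + 1, pvOrd c, pvOrd c) := by
        simp only [stepB, if_neg hcond]
      rw [hstepB]
      apply ih (results ++ [subs]) [c] (pvOrd c) (pvOrd c) (count + 1) _ _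
      · rw [hc]; push_cast [List.length_append, List.length_cons, List.length_nil]; omega
      · rw [scan_eq]; simp [foldMax, foldMin]

-- ===== VERDICT (by name: the statement is the Claim_ definition above) =====
theorem goodSubstrings_spec : Claim_equal_goodSubstrings := by
  intro s k _hDom _hPre
  unfold Spec_goodSubstrings goodSubstrings goodSubstrings_alt
  by_cases hguard : (s.toList.length == 1 || (PySem.Set.ofList s.toList).length == 1) = true
  · simp only [hguard, if_true]
  · simp only [Bool.not_eq_true] at hguard
    simp only [hguard, Bool.false_eq_true, if_false]
    cases hcs : s.toList with
    | nil => rfl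
    | cons c0 rest =>
      simp only [List.length_append, List.length_cons, List.length_nil]
      push_cast
      exact (loop_inv k rest [] [c0] (pvOrd c0) (pvOrd c0) 1 (pvOrd c0) (pvOrd c0)
        (by simp) (by rw [scan_eq]; simp [foldMax, foldMin])).symm
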